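-- pv_equiv track=rewrite | github.com/HorvathDawson/BC-freshwater-fishing-regulations | pipeline/enrichment/tributary_enricher.py | _get_parent_wscs
-- ===== SOURCE A (Python) =====
-- from typing import Dict, FrozenSet, List, Set, Tuple
--
-- def _get_parent_wscs(wsc: str) -> Set[str]:
--     """Return parent watershed codes by zeroing sections right-to-left.
--
--     Prevents BFS from traversing onto a parent stream (e.g. the Fraser
--     mainstem) and then back down into unrelated tributaries.
--
--     Example::
--
--         "100-123456-789000" → {"100-123456", "100"}
--
--     Works on trimmed WSCs (no trailing ``-000000`` padding).
--     """
--     if not wsc: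
--         return set()
--     sections = wsc.split("-")
--     parents: Set[str] = set()
--     for i in range(len(sections) - 1, 0, -1):
--         if sections[i] != "000000":
--             parent = "-".join(sections[:i])
--             parents.add(parent)
--     return parents
-- ===== SOURCE B (Python) =====
-- def _get_parent_wscs(wsc: str):
--     """Peel trailing sections off one shrinking string instead of
--     splitting into a section list and re-joining slices."""
--     parents = set()
--     current = wsc
--     while "-" in current:
--         head, _, tail = current.rpartition("-")
--         if tail != "000000":
--             parents.add(head)
--         current = head
--     return parents
-- ===== Notes on version B (the rewrite author's own statement) =====
-- stated objective: simpler
-- what changed: B never splits the string: it keeps one shrinking string and repeatedly peels the trailing section off with rpartition, so the explicit section list, the index range, the slices and the separator-join rebuilds (and the empty-string guard) all disappear.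
import Mathlib
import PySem

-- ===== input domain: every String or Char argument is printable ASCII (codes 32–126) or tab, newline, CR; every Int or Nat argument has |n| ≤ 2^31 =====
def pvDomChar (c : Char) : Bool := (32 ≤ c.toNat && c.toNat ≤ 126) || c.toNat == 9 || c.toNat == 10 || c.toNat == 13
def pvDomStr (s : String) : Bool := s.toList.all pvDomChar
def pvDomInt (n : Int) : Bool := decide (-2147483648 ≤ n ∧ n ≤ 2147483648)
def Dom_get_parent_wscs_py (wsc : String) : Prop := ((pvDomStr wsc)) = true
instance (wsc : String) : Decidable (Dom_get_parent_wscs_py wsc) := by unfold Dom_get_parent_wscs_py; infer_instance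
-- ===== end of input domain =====

-- B replaces A's split/index/slice/join machinery by peeling the trailing section off one
-- shrinking string with rpartition (objective: simpler); return values proved equal everywhere.

-- ===== PORT A =====
def get_parent_wscs_py (wsc : String) : List String :=
  if PySem.Str.len wsc = 0 then PySem.Set.empty                        -- if not wsc: return set()
  else
    -- sections = wsc.split("-")  (non-empty literal separator: Chars.splitOn is exact)
    let sections := (PySem.Chars.splitOn wsc.toList ['-']).map String.ofList
    -- for i in range(len(sections) - 1, 0, -1): …
    (PySem.List.pyRange ((sections.length : Int) - 1) 0 (-1)).foldl
      (fun parents i =>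
        if PySem.List.pyGetD sections i "" ≠ "000000" then             -- if sections[i] != "000000":
          PySem.Set.add parents
            (PySem.Str.join "-" (PySem.List.slice sections none (some i)))  -- "-".join(sections[:i])
        else parents)
      PySem.Set.empty

-- ===== PORT B =====
-- current.rpartition("-") ported by hand for the case B uses (when "-" occurs in current):
-- lastSplit cs = some (head, tail) with cs = head ++ '-' :: tail and '-' ∉ tail (split at the
-- LAST '-', exactly rpartition's head/tail); lastSplit cs = none exactly when '-' ∉ cs, i.e.
-- when Python's loop guard '"-" in current' is false.
def lastSplit (cs : List Char) : Option (List Char × List Char) :=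
  match cs with
  | [] => none
  | c :: rest =>
    match lastSplit rest with
    | some (h, t) => some (c :: h, t)
    | none => if c = '-' then some ([], rest) else none

theorem lastSplit_length {cs h t : List Char} (e : lastSplit cs = some (h, t)) :
    h.length < cs.length := by
  induction cs generalizing h t with
  | nil => simp [lastSplit] at e
  | cons c rest ih =>
    cases hr : lastSplit rest with
    | some p =>
      obtain ⟨h', t'⟩ := p
      simp [lastSplit, hr] at e
      obtain ⟨e1, e2⟩ := e
      subst e1
      have := ih hr
      simp
      omega
    | none =>
      by_cases hc : c = '-'
      · simp [lastSplit, hr, hc] at e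
        obtain ⟨e1, e2⟩ := e
        subst e1
        simp
      · simp [lastSplit, hr, hc] at e

-- while "-" in current: head, _, tail = current.rpartition("-"); if tail != "000000": parents.add(head); current = head
def bLoop (cs : List Char) (parents : List String) : List String :=
  match e : lastSplit cs with
  | none => parents
  | some (h, t) =>
    bLoop h (if String.ofList t ≠ "000000" then PySem.Set.add parents (String.ofList h) else parents)
termination_by cs.length
decreasing_by exact lastSplit_length e

def get_parent_wscs_py_alt (wsc : String) : List String :=
  bLoop wsc.toList PySem.Set.empty

-- ===== PRECONDITION & SPEC =====
def Spec_get_parent_wscs_py (wsc : String) (out : List String) : Prop := out = get_parent_wscs_py_alt wsc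
instance (wsc : String) (out : List String) : Decidable (Spec_get_parent_wscs_py wsc out) := by unfold Spec_get_parent_wscs_py; infer_instance

-- ===== CLAIM (what is proved, stated in full; the proofs are below) =====
def Claim_equal_get_parent_wscs_py : Prop := ∀ (wsc : String), Dom_get_parent_wscs_py wsc → Spec_get_parent_wscs_py wsc (get_parent_wscs_py wsc)

-- ===== LEMMAS AND PROOFS =====

theorem bLoop_eq_none {cs : List Char} (h : lastSplit cs = none) (P : List String) :
    bLoop cs P = P := by
  rw [bLoop.eq_def]
  split <;> simp_all

theorem bLoop_eq_some {cs hd tl : List Char} (h : lastSplit cs = some (hd, tl)) (P : List String) :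
    bLoop cs P
      = bLoop hd (if String.ofList tl ≠ "000000" then PySem.Set.add P (String.ofList hd) else P) := by
  rw [bLoop.eq_def]
  split <;> simp_all

-- splitDash l = (first piece, later pieces) of splitting l at every '-'
def splitDash (l : List Char) : List Char × List (List Char) :=
  match l with
  | [] => ([], [])
  | c :: rest =>
    if c = '-' then ([], (splitDash rest).1 :: (splitDash rest).2)
    else (c :: (splitDash rest).1, (splitDash rest).2)

theorem go_nil (fuel : Nat) (cur : List Char) (acc : List (List Char)) :
    PySem.Chars.splitOn.go ['-'] fuel [] cur acc = (cur.reverse :: acc).reverse := by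
  rw [PySem.Chars.splitOn.go.eq_def]
  split <;> simp_all

theorem go_cons_raw (f : Nat) (c : Char) (rest cur : List Char) (acc : List (List Char)) :
    PySem.Chars.splitOn.go ['-'] (f + 1) (c :: rest) cur acc
      = if (['-'] : List Char).isPrefixOf (c :: rest) = true then
          PySem.Chars.splitOn.go ['-'] f (List.drop (['-'] : List Char).length (c :: rest)) [] (cur.reverse :: acc)
        else PySem.Chars.splitOn.go ['-'] f rest (c :: cur) acc := rfl

theorem go_cons (f : Nat) (c : Char) (rest cur : List Char) (acc : List (List Char)) :
    PySem.Chars.splitOn.go ['-'] (f + 1) (c :: rest) cur acc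
      = if c = '-' then PySem.Chars.splitOn.go ['-'] f rest [] (cur.reverse :: acc)
        else PySem.Chars.splitOn.go ['-'] f rest (c :: cur) acc := by
  rw [go_cons_raw]
  by_cases hc : c = '-'
  · subst hc
    rw [if_pos (by simp [List.isPrefixOf]), if_pos rfl]
    rfl
  · rw [if_neg (by simp [List.isPrefixOf]; intro h; exact hc h.symm), if_neg hc]

theorem splitOn_go_spec (l : List Char) : ∀ (fuel : Nat) (cur : List Char) (acc : List (List Char)),
    l.length ≤ fuel →
    PySem.Chars.splitOn.go ['-'] fuel l cur acc
      = acc.reverse ++ (cur.reverse ++ (splitDash l).1) :: (splitDash l).2 := by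
  induction l with
  | nil =>
    intro fuel cur acc _
    rw [go_nil]
    simp [splitDash]
  | cons c rest ih =>
    intro fuel cur acc hf
    cases fuel with
    | zero => simp at hf
    | succ f =>
      rw [go_cons]
      have hf' : rest.length ≤ f := by simpa using hf
      by_cases hc : c = '-'
      · subst hc
        rw [if_pos rfl, ih f [] (cur.reverse :: acc) hf']
        simp [splitDash]
      · rw [if_neg hc, ih f (c :: cur) acc hf']
        simp [splitDash, hc]

theorem splitOn_eq_splitDash (l : List Char) :
    PySem.Chars.splitOn l ['-'] = (splitDash l).1 :: (splitDash l).2 := by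
  rw [PySem.Chars.splitOn.eq_1, splitOn_go_spec l (l.length + 1) [] [] (by omega)]
  simp

theorem splitDash_no_dash (l : List Char) :
    '-' ∉ (splitDash l).1 ∧ ∀ p ∈ (splitDash l).2, '-' ∉ p := by
  induction l with
  | nil => simp [splitDash]
  | cons c rest ih =>
    by_cases hc : c = '-'
    · subst hc
      have hs : splitDash ('-' :: rest) = ([], (splitDash rest).1 :: (splitDash rest).2) := by
        simp [splitDash]
      rw [hs]
      refine ⟨by simp, ?_⟩
      intro p hp
      rcases List.mem_cons.1 hp with rfl | hp
      · exact ih.1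
      · exact ih.2 p hp
    · have hs : splitDash (c :: rest) = (c :: (splitDash rest).1, (splitDash rest).2) := by
        simp [splitDash, hc]
      rw [hs]
      refine ⟨?_, ih.2⟩
      intro hmem
      rcases List.mem_cons.1 hmem with h | h
      · exact hc h.symm
      · exact ih.1 h

theorem join_splitDash (l : List Char) :
    PySem.Chars.join ['-'] ((splitDash l).1 :: (splitDash l).2) = l := by
  induction l with
  | nil => simp [splitDash, PySem.Chars.join_singleton]
  | cons c rest ih =>
    by_cases hc : c = '-'
    · subst hc
      have hs : splitDash ('-' :: rest) = ([], (splitDash rest).1 :: (splitDash rest).2) := by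
        simp [splitDash]
      rw [hs, PySem.Chars.join_cons_cons, ih]
      simp
    · have hs1 : (splitDash (c :: rest)).1 = c :: (splitDash rest).1 := by
        simp [splitDash, hc]
      have hs2 : (splitDash (c :: rest)).2 = (splitDash rest).2 := by
        simp [splitDash, hc]
      rw [hs1, hs2]
      cases hd : (splitDash rest).2 with
      | nil =>
        rw [hd] at ih
        rw [PySem.Chars.join_singleton] at ih ⊢
        simp [ih]
      | cons q qs =>
        rw [hd] at ih
        rw [PySem.Chars.join_cons_cons] at ih ⊢
        simp only [List.cons_append, List.append_assoc] at ih ⊢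
        rw [ih]

theorem lastSplit_of_no_dash {l : List Char} (h : '-' ∉ l) : lastSplit l = none := by
  induction l with
  | nil => simp [lastSplit]
  | cons c rest ih =>
    simp only [List.mem_cons, not_or] at h
    simp [lastSplit, ih h.2, Ne.symm, h.1]

theorem lastSplit_append {a b : List Char} (hb : '-' ∉ b) :
    lastSplit (a ++ '-' :: b) = some (a, b) := by
  induction a with
  | nil => simp [lastSplit, lastSplit_of_no_dash hb]
  | cons c a' ih => simp [lastSplit, ih]

theorem join_append_singleton {secs : List (List Char)} (hne : secs ≠ []) (t : List Char) :
    PySem.Chars.join ['-'] (secs ++ [t]) = PySem.Chars.join ['-'] secs ++ '-' :: t := by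
  induction secs with
  | nil => exact absurd rfl hne
  | cons x xs ih =>
    cases xs with
    | nil => simp [PySem.Chars.join_cons_cons, PySem.Chars.join_singleton]
    | cons y ys =>
      have ih' := ih (by simp)
      simp only [List.cons_append] at ih' ⊢
      rw [PySem.Chars.join_cons_cons, ih', PySem.Chars.join_cons_cons]
      simp [List.append_assoc]

theorem strJoin_map (secs : List (List Char)) :
    PySem.Str.join "-" (secs.map String.ofList) = String.ofList (PySem.Chars.join ['-'] secs) := by
  simp only [PySem.Str.join, List.map_map]
  have : (String.toList ∘ String.ofList) = id := by
    funext x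
    simp
  rw [this, List.map_id]
  rfl

theorem main_lemma (secs : List (List Char)) (hnd : ∀ p ∈ secs, '-' ∉ p) :
    ∀ P : List String,
      bLoop (PySem.Chars.join ['-'] secs) P
        = (PySem.List.pyRange (((secs.map String.ofList).length : Int) - 1) 0 (-1)).foldl
            (fun parents i =>
              if PySem.List.pyGetD (secs.map String.ofList) i "" ≠ "000000" then
                PySem.Set.add parents
                  (PySem.Str.join "-" (PySem.List.slice (secs.map String.ofList) none (some i)))
              else parents)
            P := by
  induction secs using List.reverseRecOn with
  | nil =>
    intro P
    rw [PySem.Chars.join_nil, PySem.List.pyRange_neg_one_eq_nil (by simp)]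
    exact bLoop_eq_none (by simp [lastSplit]) P
  | append_singleton secs t ih =>
    intro P
    by_cases hsecs : secs = []
    · subst hsecs
      simp only [List.nil_append]
      rw [PySem.Chars.join_singleton, PySem.List.pyRange_neg_one_eq_nil (by simp)]
      simp only [List.foldl_nil]
      exact bLoop_eq_none (lastSplit_of_no_dash (hnd t (by simp))) P
    · have htnd : '-' ∉ t := hnd t (by simp)
      have hsnd : ∀ p ∈ secs, '-' ∉ p := fun p hp => hnd p (by simp [hp])
      rw [join_append_singleton hsecs t,
        bLoop_eq_some (lastSplit_append htnd) P]
      have hn : 1 ≤ secs.length := by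
        cases secs
        · exact absurd rfl hsecs
        · simp
      have hlen : ((((secs ++ [t]).map String.ofList).length : Int) - 1) = (secs.length : Int) := by
        simp
      rw [hlen, PySem.List.pyRange_neg_one_cons (by exact_mod_cast hn)]
      simp only [List.foldl_cons]
      have hget : PySem.List.pyGetD ((secs ++ [t]).map String.ofList) (secs.length : Int) ""
          = String.ofList t := by
        have : ((secs.length : Nat) : Int) = (secs.length : Int) := rfl
        rw [← this, PySem.List.pyGetD_natCast]
        simp [List.getD]
      have hslice : PySem.List.slice ((secs ++ [t]).map String.ofList) none (some (secs.length : Int))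
          = secs.map String.ofList := by
        have : ((secs.length : Nat) : Int) = (secs.length : Int) := rfl
        rw [← this, PySem.List.slice_to_natCast]
        simp
      rw [hget, hslice, strJoin_map]
      have hcongr :
          (PySem.List.pyRange ((secs.length : Int) - 1) 0 (-1)).foldl
            (fun parents i =>
              if PySem.List.pyGetD ((secs ++ [t]).map String.ofList) i "" ≠ "000000" then
                PySem.Set.add parents
                  (PySem.Str.join "-" (PySem.List.slice ((secs ++ [t]).map String.ofList) none (some i)))
              else parents)
            (if String.ofList t ≠ "000000" then
                PySem.Set.add P (String.ofList (PySem.Chars.join ['-'] secs)) else P)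
          = (PySem.List.pyRange (((secs.map String.ofList).length : Int) - 1) 0 (-1)).foldl
            (fun parents i =>
              if PySem.List.pyGetD (secs.map String.ofList) i "" ≠ "000000" then
                PySem.Set.add parents
                  (PySem.Str.join "-" (PySem.List.slice (secs.map String.ofList) none (some i)))
              else parents)
            (if String.ofList t ≠ "000000" then
                PySem.Set.add P (String.ofList (PySem.Chars.join ['-'] secs)) else P) := by
        have hl : (((secs.map String.ofList).length : Int) - 1) = ((secs.length : Int) - 1) := by
          simp
        rw [hl]
        apply PySem.List.foldl_congr_mem
        intro acc i hi
        rw [PySem.List.mem_pyRange_neg_one] at hi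
        obtain ⟨hi0, hi1⟩ := hi
        obtain ⟨k, rfl⟩ : ∃ k : Nat, (k : Int) = i := ⟨i.toNat, by omega⟩
        have hk : k < secs.length := by omega
        have e1 : PySem.List.pyGetD ((secs ++ [t]).map String.ofList) (k : Int) ""
            = PySem.List.pyGetD (secs.map String.ofList) (k : Int) "" := by
          rw [PySem.List.pyGetD_natCast, PySem.List.pyGetD_natCast]
          have hk' : k < (List.map String.ofList secs).length := by simpa using hk
          rw [List.getD, List.getD, List.map_append, List.getElem?_append_left hk']
        have e2 : PySem.List.slice ((secs ++ [t]).map String.ofList) none (some (k : Int))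
            = PySem.List.slice (secs.map String.ofList) none (some (k : Int)) := by
          rw [PySem.List.slice_to_natCast, PySem.List.slice_to_natCast]
          rw [List.map_append, List.take_append_of_le_length (by simpa using Nat.le_of_lt hk)]
        rw [e1, e2]
      rw [hcongr]
      exact ih hsnd _

-- ===== VERDICT (by name: the statement is the Claim_ definition above) =====
theorem get_parent_wscs_py_spec : Claim_equal_get_parent_wscs_py := by
  intro wsc _
  unfold Spec_get_parent_wscs_py get_parent_wscs_py get_parent_wscs_py_alt
  by_cases h0 : PySem.Str.len wsc = 0
  · rw [if_pos h0]
    have he : wsc.toList = [] := by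
      simpa [PySem.Str.len] using h0
    rw [he, bLoop_eq_none (by simp [lastSplit])]
  · rw [if_neg h0]
    have hnd := splitDash_no_dash wsc.toList
    rw [splitOn_eq_splitDash]
    conv_rhs => rw [← join_splitDash wsc.toList]
    rw [main_lemma ((splitDash wsc.toList).1 :: (splitDash wsc.toList).2)
      (by
        intro p hp
        rcases List.mem_cons.1 hp with rfl | hp
        · exact hnd.1
        · exact hnd.2 p hp) PySem.Set.empty]
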